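-- pv_equiv track=rewrite | github.com/y0un922/euroqa | server/core/retrieval.py | _cross_doc_aggregate
-- ===== SOURCE A (Python) =====
-- def _cross_doc_aggregate(
--
--     results: list[dict],
--     max_per_source: int = 5,
--     filters: dict | None = None,
-- ) -> list[dict]:
--     """跨文档聚合：限制每个来源文档的最大 chunk 数量，确保结果多样性。"""
--     filters = filters or {}
--     unique_sources = {result.get("source", "") for result in results}
--     if "source" in filters or len(unique_sources) <= 1:
--         return results
--
--     source_counts: dict[str, int] = {}
--     aggregated: list[dict] = []
--
--     for result in results:
--         src = result.get("source", "")
--         count = source_counts.get(src, 0)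
--         if count < max_per_source:
--             aggregated.append(result)
--             source_counts[src] = count + 1
--
--     return aggregated
-- ===== SOURCE B (Python) =====
-- def _cross_doc_aggregate(
--     results: list[dict],
--     max_per_source: int = 5,
--     filters: dict | None = None,
-- ) -> list[dict]:
--     """Group-then-slice reimplementation: build a per-source table of positions,
--     keep the first max_per_source positions of each source, filter in order."""
--     filters = filters or {}
--     unique_sources = {result.get("source", "") for result in results}
--     if "source" in filters or len(unique_sources) <= 1:
--         return results
--
--     groups: dict[str, list[int]] = {}
--     for i, result in enumerate(results):
--         groups.setdefault(result.get("source", ""), []).append(i)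
--
--     keep = max(max_per_source, 0)
--     kept = {i for idxs in groups.values() for i in idxs[:keep]}
--     return [result for i, result in enumerate(results) if i in kept]
-- ===== Notes on version B (the rewrite author's own statement) =====
-- stated objective: alternative
-- what changed: The interleaved per-source counter loop is replaced by a group-then-slice decomposition: one pass builds a dict mapping each source to the list of its positions, each list is truncated to the first max_per_source positions into a kept-set, and a second pass filters the results in original order.
import Mathlib
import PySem

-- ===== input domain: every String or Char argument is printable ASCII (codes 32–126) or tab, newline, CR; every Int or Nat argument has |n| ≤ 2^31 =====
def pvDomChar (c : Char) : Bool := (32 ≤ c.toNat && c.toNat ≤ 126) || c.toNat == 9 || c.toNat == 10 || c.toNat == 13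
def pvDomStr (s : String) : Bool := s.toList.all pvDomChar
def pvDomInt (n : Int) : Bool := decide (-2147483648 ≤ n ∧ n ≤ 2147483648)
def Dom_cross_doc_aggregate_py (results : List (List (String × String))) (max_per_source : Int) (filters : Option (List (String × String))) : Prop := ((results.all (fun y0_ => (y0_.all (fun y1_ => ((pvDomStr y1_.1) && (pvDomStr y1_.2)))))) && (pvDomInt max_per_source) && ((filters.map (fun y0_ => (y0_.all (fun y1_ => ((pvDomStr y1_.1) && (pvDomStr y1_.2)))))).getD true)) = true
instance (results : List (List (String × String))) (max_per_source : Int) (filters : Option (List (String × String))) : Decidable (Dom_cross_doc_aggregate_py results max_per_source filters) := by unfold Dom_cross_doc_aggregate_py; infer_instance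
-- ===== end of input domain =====

-- B replaces A's interleaved per-source counter loop by a group-then-slice decomposition
-- (per-source position table, truncate each group, filter in original order); alternative, same cost.

-- ===== PORT A =====
-- result.get("source", "") (shared accessor, used by both ports)
def pySrc (r : List (String × String)) : String :=
  PySem.Dict.getD (PySem.Dict.mk r) "source" ""

def cross_doc_aggregate_py (results : List (List (String × String))) (max_per_source : Int) (filters : Option (List (String × String))) : List (List (String × String)) :=
  -- filters = filters or {}
  let f : List (String × String) := match filters with
    | none => []
    | some d => if d.isEmpty then [] else d
  let unique_sources : PySem.Set String := PySem.Set.ofList (results.map pySrc)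
  if PySem.Dict.contains (PySem.Dict.mk f) "source" || decide (unique_sources.length ≤ 1) then
    results
  else
    (results.foldl
      (fun (st : PySem.Dict String Int × List (List (String × String))) result =>
        let src := pySrc result
        let count := PySem.Dict.getD st.1 src 0
        if count < max_per_source then
          (PySem.Dict.insert st.1 src (count + 1), st.2 ++ [result])
        else st)
      (PySem.Dict.empty, [])).2

-- ===== PORT B =====
def cross_doc_aggregate_py_alt (results : List (List (String × String))) (max_per_source : Int) (filters : Option (List (String × String))) : List (List (String × String)) :=
  let f : List (String × String) := match filters with
    | none => []
    | some d => if d.isEmpty then [] else d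
  let unique_sources : PySem.Set String := PySem.Set.ofList (results.map pySrc)
  if PySem.Dict.contains (PySem.Dict.mk f) "source" || decide (unique_sources.length ≤ 1) then
    results
  else
    -- groups: source -> list of positions, one pass over enumerate(results)
    let groups : PySem.Dict String (List Int) :=
      (PySem.List.enumerate results 0).foldl
        (fun d p => d.modify (pySrc p.2) [] (· ++ [p.1])) PySem.Dict.empty
    let keep := max max_per_source 0
    let kept : PySem.Set Int :=
      PySem.Set.ofList (groups.values.flatMap (fun idxs => PySem.List.slice idxs none (some keep)))
    ((PySem.List.enumerate results 0).filter (fun p => kept.contains p.1)).map (·.2)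

-- ===== PRECONDITION & SPEC =====
def Spec_cross_doc_aggregate_py (results : List (List (String × String))) (max_per_source : Int) (filters : Option (List (String × String))) (out : List (List (String × String))) : Prop := out = cross_doc_aggregate_py_alt results max_per_source filters
instance (results : List (List (String × String))) (max_per_source : Int) (filters : Option (List (String × String))) (out : List (List (String × String))) : Decidable (Spec_cross_doc_aggregate_py results max_per_source filters out) := by unfold Spec_cross_doc_aggregate_py; infer_instance

-- ===== CLAIM (what is proved, stated in full; the proofs are below) =====
def Claim_equal_cross_doc_aggregate_py : Prop := ∀ (results : List (List (String × String))) (max_per_source : Int) (filters : Option (List (String × String))), Dom_cross_doc_aggregate_py results max_per_source filters → Spec_cross_doc_aggregate_py results max_per_source filters (cross_doc_aggregate_py results max_per_source filters)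

-- ===== LEMMAS AND PROOFS =====

-- number of earlier results with source s
def srcCnt (pre : List (List (String × String))) (s : String) : Nat :=
  pre.countP (fun x => pySrc x == s)

-- reference recursion: keep a result iff fewer than m same-source results precede it
def specAgg (m : Int) : List (List (String × String)) → List (List (String × String)) → List (List (String × String))
  | _, [] => []
  | pre, r :: rest =>
    if ((srcCnt pre (pySrc r) : Int)) < m then r :: specAgg m (pre ++ [r]) rest
    else specAgg m (pre ++ [r]) rest

-- ----- A-side: the counter loop computes specAgg -----
theorem lemA (m : Int) (rest : List (List (String × String))) :
    ∀ (pre : List (List (String × String))) (counts : PySem.Dict String Int)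
      (acc : List (List (String × String))),
      (∀ s, counts.getD s 0 = min ((srcCnt pre s : Int)) (max m 0)) →
      (rest.foldl
        (fun (st : PySem.Dict String Int × List (List (String × String))) result =>
          let src := pySrc result
          let count := PySem.Dict.getD st.1 src 0
          if count < m then (PySem.Dict.insert st.1 src (count + 1), st.2 ++ [result])
          else st)
        (counts, acc)).2 = acc ++ specAgg m pre rest := by
  induction rest with
  | nil => intro pre counts acc _; simp [specAgg]
  | cons r t ih =>
    intro pre counts acc hinv
    have hc := hinv (pySrc r)
    have hcntr : ∀ s, s = pySrc r → srcCnt (pre ++ [r]) s = srcCnt pre s + 1 := by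
      intro s hs; subst hs; simp [srcCnt, List.countP_append]
    have hcnto : ∀ s, s ≠ pySrc r → srcCnt (pre ++ [r]) s = srcCnt pre s := by
      intro s hs; simp [srcCnt, List.countP_append, Ne.symm hs]
    simp only [List.foldl_cons, specAgg]
    by_cases h : ((srcCnt pre (pySrc r) : Nat) : Int) < m
    · have hlt : PySem.Dict.getD counts (pySrc r) 0 < m := by rw [hc]; omega
      have hinv' : ∀ s,
          (PySem.Dict.insert counts (pySrc r) (PySem.Dict.getD counts (pySrc r) 0 + 1)).getD s 0
            = min ((srcCnt (pre ++ [r]) s : Nat) : Int) (max m 0) := by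
        intro s
        rw [PySem.Dict.getD_insert]
        by_cases hs : s = pySrc r
        · rw [if_pos hs, hc, hcntr s hs, hs]; push_cast; omega
        · rw [if_neg hs, hinv s, hcnto s hs]
      rw [if_pos h, if_pos hlt]
      have := ih (pre ++ [r]) _ (acc ++ [r]) hinv'
      simp only at this ⊢
      rw [this]; simp
    · have hge : ¬ PySem.Dict.getD counts (pySrc r) 0 < m := by rw [hc]; omega
      have hinv' : ∀ s, counts.getD s 0 = min ((srcCnt (pre ++ [r]) s : Nat) : Int) (max m 0) := by
        intro s
        by_cases hs : s = pySrc r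
        · rw [hs, hc, hcntr _ rfl]; push_cast; omega
        · rw [hinv s, hcnto s hs]
      rw [if_neg h, if_neg hge]
      exact ih (pre ++ [r]) counts acc hinv'

-- ----- B-side -----

-- membership in take of a strictly increasing list
theorem mem_take_sorted {α : Type} [LinearOrder α] [DecidableEq α] (l : List α)
    (hl : l.Pairwise (· < ·)) (i : α) (n : Nat) :
    i ∈ l.take n ↔ i ∈ l ∧ l.countP (fun x => decide (x < i)) < n := by
  induction l generalizing n with
  | nil => simp
  | cons a t ih =>
    have hat : ∀ x ∈ t, a < x := fun x hx => List.rel_of_pairwise_cons hl hx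
    have ht : t.Pairwise (· < ·) := hl.of_cons
    cases n with
    | zero => simp
    | succ n' =>
      rw [List.take_succ_cons]
      by_cases hi : i = a
      · subst hi
        have h0 : t.countP (fun x => decide (x < i)) = 0 := by
          rw [List.countP_eq_zero]
          intro x hx
          simp only [decide_eq_true_eq]
          exact not_lt.mpr (le_of_lt (hat x hx))
        simp [h0]
      · by_cases hit : i ∈ t
        · have hai : a < i := hat i hit
          simp only [List.mem_cons, hi, false_or, List.countP_cons, decide_eq_true_eq, hai,
            if_pos, ih ht]
          constructor
          · rintro ⟨h1, h2⟩; exact ⟨h1, by omega⟩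
          · rintro ⟨h1, h2⟩; exact ⟨h1, by omega⟩
        · have h1 : i ∉ t.take n' := fun hh => hit (List.mem_of_mem_take hh)
          simp [hi, hit, h1]

-- filter over enumerate with the prefix-count predicate computes specAgg
theorem lemB2 (m : Int) (rest : List (List (String × String))) :
    ∀ (pre full : List (List (String × String))), full = pre ++ rest →
    ((PySem.List.enumerate rest (pre.length : Int)).filter
        (fun p => decide (((srcCnt (full.take p.1.toNat) (pySrc p.2) : Nat) : Int) < m))).map (·.2)
      = specAgg m pre rest := by
  induction rest with
  | nil => intro pre full _; simp [specAgg, PySem.List.enumerate_nil]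
  | cons r t ih =>
    intro pre full hfull
    rw [PySem.List.enumerate_cons, List.filter_cons]
    have h1 : ((pre.length : Int)).toNat = pre.length := Int.toNat_natCast _
    have h2 : full.take pre.length = pre := by
      rw [hfull, List.take_left]
    have h3 : ((pre.length : Int)) + 1 = ((pre ++ [r]).length : Int) := by
      simp
    have h4 : full = (pre ++ [r]) ++ t := by simp [hfull]
    have hih := ih (pre ++ [r]) full h4
    by_cases h : ((srcCnt pre (pySrc r) : Nat) : Int) < m
    · rw [if_pos (by simp only [h1, h2]; exact decide_eq_true h)]
      simp only [List.map_cons, specAgg, if_pos h, h3, hih]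
    · rw [if_neg (by simp only [h1, h2]; exact fun hh => h (of_decide_eq_true hh))]
      simp only [specAgg, if_neg h, h3, hih]

-- entries of enumerate xs n all have index ≥ n: a bound B ≤ n kills the count
theorem enumCountZero (g : List (String × String) → Bool)
    (xs : List (List (String × String))) (n : Nat) (B : Int) (hB : B ≤ (n : Int)) :
    (PySem.List.enumerate xs (n : Int)).countP (fun q => decide (q.1 < B) && g q.2) = 0 := by
  rw [List.countP_eq_zero]
  intro q hq
  obtain ⟨j, hj, rfl⟩ := (PySem.List.mem_enumerate_iff _ _ _).mp hq
  simp only [Bool.and_eq_true, decide_eq_true_eq]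
  rintro ⟨h1, _⟩
  omega

-- counting enumerate entries below index n+k with property g = counting g on the first k elements
theorem enumCountP (g : List (String × String) → Bool) :
    ∀ (xs : List (List (String × String))) (n k : Nat),
    (PySem.List.enumerate xs (n : Int)).countP
        (fun q => decide (q.1 < ((n + k : Nat) : Int)) && g q.2)
      = (xs.take k).countP g := by
  intro xs
  induction xs with
  | nil => intro n k; simp [PySem.List.enumerate_nil]
  | cons x t ih =>
    intro n k
    rw [PySem.List.enumerate_cons, List.countP_cons]
    cases k with
    | zero =>
      have hz : (PySem.List.enumerate t ((n : Int) + 1)).countP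
          (fun q => decide (q.1 < ((n + 0 : Nat) : Int)) && g q.2) = 0 := by
        have := enumCountZero g t (n + 1) ((n + 0 : Nat) : Int) (by push_cast; omega)
        simpa using this
      simp only [hz]
      simp
    | succ k' =>
      have hcast : ((n + (k' + 1) : Nat) : Int) = (((n + 1) + k' : Nat) : Int) := by
        push_cast; ring
      have h1 : (PySem.List.enumerate t ((n : Int) + 1)).countP
          (fun q => decide (q.1 < ((n + (k' + 1) : Nat) : Int)) && g q.2)
          = (t.take k').countP g := by
        rw [hcast]
        have := ih (n + 1) k'
        simpa using this
      have hcond : (decide ((n : Int) < ((n + (k' + 1) : Nat) : Int)) && g x) = (g x) := by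
        have h : ((n : Int)) < ((n + (k' + 1) : Nat) : Int) := by push_cast; omega
        simp only [decide_eq_true h, Bool.true_and]
      simp only [h1, hcond, List.take_succ_cons, List.countP_cons]

-- the kept-set test of B equals the prefix-count test, pointwise on enumerate(results)
theorem lemB1 (m : Int) (results : List (List (String × String)))
    (p : Int × List (String × String)) (hp : p ∈ PySem.List.enumerate results 0) :
    (PySem.Set.ofList
        ((((PySem.List.enumerate results 0).foldl
            (fun (d : PySem.Dict String (List Int)) q => d.modify (pySrc q.2) [] (· ++ [q.1]))
            PySem.Dict.empty).values).flatMap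
          (fun idxs => PySem.List.slice idxs none (some (max m 0))))).contains p.1
      = decide (((srcCnt (results.take p.1.toNat) (pySrc p.2) : Nat) : Int) < m) := by
  obtain ⟨k, hk, rfl⟩ := (PySem.List.mem_enumerate_iff _ _ _).mp hp
  simp only [Int.zero_add, Int.toNat_natCast]
  set E := PySem.List.enumerate results 0 with hE
  set tagged := E.map (fun q => (pySrc q.2, q.1)) with htagged
  have hfold :
      E.foldl (fun (d : PySem.Dict String (List Int)) q => d.modify (pySrc q.2) [] (· ++ [q.1]))
        PySem.Dict.empty
      = tagged.foldl (fun (d : PySem.Dict String (List Int)) q => d.modify q.1 [] (· ++ [q.2]))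
        PySem.Dict.empty := by
    rw [htagged, List.foldl_map]
  set groups := tagged.foldl (fun (d : PySem.Dict String (List Int)) q => d.modify q.1 [] (· ++ [q.2]))
        PySem.Dict.empty with hgroups
  have hkeysnd : groups.keys.Nodup := by
    rw [hgroups]
    exact PySem.Dict.nodup_keys_foldl_modify_key tagged Prod.fst [] _ _ PySem.Dict.nodup_keys_empty
  have hG : ∀ s, groups.getD s [] = (tagged.filter (fun q => q.1 == s)).map (·.2) := by
    intro s
    rw [hgroups, PySem.Dict.getD_foldl_modify_append]
    simp
  have hvals : groups.values = groups.keys.map (fun s => groups.getD s []) :=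
    PySem.Dict.values_eq_map_keys groups hkeysnd []
  have hsorted : ∀ s, ((tagged.filter (fun q => q.1 == s)).map (·.2)).Pairwise (· < ·) := by
    intro s
    have h1 : E.Pairwise (fun a b => a.1 < b.1) := PySem.List.pairwise_lt_enumerate _ _
    have h2 : tagged.Pairwise (fun a b => a.2 < b.2) := by
      rw [htagged]; exact List.Pairwise.map _ (fun a b h => h) h1
    have h3 : (tagged.filter (fun q => q.1 == s)).Pairwise (fun a b => a.2 < b.2) :=
      h2.sublist List.filter_sublist
    exact List.Pairwise.map _ (fun a b h => h) h3
  have hGmem : ∀ (s : String) (i : Int), i ∈ (tagged.filter (fun q => q.1 == s)).map (·.2) ↔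
      ∃ (j : Nat), ∃ _ : j < results.length, i = (j : Int) ∧ pySrc results[j] = s := by
    intro s i
    constructor
    · intro h
      obtain ⟨q, hq, hqi⟩ := List.mem_map.mp h
      obtain ⟨hqt, hqs⟩ := List.mem_filter.mp hq
      rw [htagged] at hqt
      obtain ⟨p', hp', hfq⟩ := List.mem_map.mp hqt
      obtain ⟨j, hj, rfl⟩ := (PySem.List.mem_enumerate_iff _ _ _).mp hp'
      refine ⟨j, hj, ?_, ?_⟩
      · rw [← hqi, ← hfq]; simp
      · have : q.1 = pySrc results[j] := by rw [← hfq]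
        rw [beq_iff_eq] at hqs
        rw [← hqs, this]
    · rintro ⟨j, hj, rfl, hs⟩
      apply List.mem_map.mpr
      refine ⟨(s, (j : Int)), List.mem_filter.mpr ⟨?_, by simp⟩, rfl⟩
      rw [htagged]
      apply List.mem_map.mpr
      refine ⟨((0 : Int) + (j : Int), results[j]), ?_, ?_⟩
      · exact (PySem.List.mem_enumerate_iff _ _ _).mpr ⟨j, hj, rfl⟩
      · simp [hs]
  have hcount : ∀ (s : String) (k : Nat), k ≤ results.length →
      ((tagged.filter (fun q => q.1 == s)).map (·.2)).countP (fun x => decide (x < (k : Int)))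
        = srcCnt (results.take k) s := by
    intro s k hkle
    have hmain := enumCountP (fun x => pySrc x == s) results 0 k
    simp only [Nat.zero_add, Nat.cast_zero] at hmain
    simp only [srcCnt]
    rw [← hmain, ← hE, htagged]
    simp only [List.countP_map, List.countP_filter]
    apply List.countP_congr
    intro q _
    simp [Bool.and_comm]
  have hkeyset : ∀ (j : Nat) (hj : j < results.length), pySrc results[j] ∈ groups.keys := by
    intro j hj
    rw [hgroups, PySem.Dict.keys_foldl_modify_key]
    have hmem : pySrc results[j] ∈ tagged.map (·.1) := by
      apply List.mem_map.mpr
      refine ⟨(pySrc results[j], (0 : Int) + (j : Int)), ?_, rfl⟩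
      rw [htagged]
      apply List.mem_map.mpr
      exact ⟨((0 : Int) + (j : Int), results[j]),
        (PySem.List.mem_enumerate_iff _ _ _).mpr ⟨j, hj, rfl⟩, rfl⟩
    simpa [PySem.Dict.keys_empty, PySem.Set.update_nil_left, PySem.Set.mem_ofList] using hmem
  have hslice : ∀ (v : List Int), PySem.List.slice v none (some (max m 0)) = v.take (max m 0).toNat :=
    fun v => PySem.List.slice_to v (le_max_right m 0)
  rw [hfold]
  apply Bool.eq_iff_iff.mpr
  rw [PySem.Set.contains_iff, PySem.Set.mem_ofList, decide_eq_true_iff, List.mem_flatMap]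
  constructor
  · rintro ⟨v, hv, hiv⟩
    rw [hvals, List.mem_map] at hv
    obtain ⟨s, _, rfl⟩ := hv
    rw [hslice, hG s] at hiv
    obtain ⟨hmem, hcnt⟩ := (mem_take_sorted _ (hsorted s) _ _).mp hiv
    obtain ⟨j, hj, hji, hjs⟩ := (hGmem s _).mp hmem
    have hjk : j = k := by exact_mod_cast hji.symm
    subst hjk
    rw [hcount s j (le_of_lt hj)] at hcnt
    rw [← hjs] at hcnt
    have h0 : (0 : Int) ≤ max m 0 := le_max_right m 0
    omega
  · intro hlt
    refine ⟨groups.getD (pySrc results[k]) [], ?_, ?_⟩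
    · rw [hvals, List.mem_map]
      exact ⟨pySrc results[k], hkeyset k hk, rfl⟩
    · rw [hslice, hG _]
      apply (mem_take_sorted _ (hsorted _) _ _).mpr
      refine ⟨(hGmem _ _).mpr ⟨k, hk, rfl, rfl⟩, ?_⟩
      rw [hcount _ k (le_of_lt hk)]
      omega

-- ===== VERDICT (by name: the statement is the Claim_ definition above) =====
theorem cross_doc_aggregate_py_spec : Claim_equal_cross_doc_aggregate_py := by
  unfold Claim_equal_cross_doc_aggregate_py
  intro results m filters _
  unfold Spec_cross_doc_aggregate_py
  simp only [cross_doc_aggregate_py, cross_doc_aggregate_py_alt]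
  split_ifs with hg
  case pos => rfl
  have hinv0 : ∀ s, (PySem.Dict.empty : PySem.Dict String Int).getD s 0
      = min ((srcCnt [] s : Nat) : Int) (max m 0) := by
    intro s
    simp [PySem.Dict.getD_empty, srcCnt]
  have hA := lemA m results [] PySem.Dict.empty [] hinv0
  simp only at hA
  rw [hA]
  have hB2 := lemB2 m results [] results rfl
  simp only [List.length_nil, Nat.cast_zero] at hB2
  rw [List.filter_congr (fun p hp => lemB1 m results p hp), hB2]
  simp
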